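-- pv_equiv track=rewrite | github.com/leo-t-1/CipherProbe | cipherprobe.py | word_cascade_dec
-- ===== SOURCE A (Python) =====
-- import string
--
-- def shift_char(ch, amount):
--     """Shift a letter by `amount`, preserving case. Non-letters pass through."""
--     if ch in string.ascii_lowercase:
--         return chr((ord(ch) - ord('a') + amount) % 26 + ord('a'))
--     if ch in string.ascii_uppercase:
--         return chr((ord(ch) - ord('A') + amount) % 26 + ord('A'))
--     return ch
--
-- def tokenize(text):
--     """Split text into ('word', ...) and ('sep', ...) tokens."""
--     if not text:
--         return []
--     tokens = []
--     current = [text[0]]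
--     in_word = text[0].isalpha()
--     for ch in text[1:]:
--         if ch.isalpha() == in_word:
--             current.append(ch)
--         else:
--             tokens.append(('word' if in_word else 'sep', ''.join(current)))
--             current = [ch]
--             in_word = ch.isalpha()
--     tokens.append(('word' if in_word else 'sep', ''.join(current)))
--     return tokens
--
-- def word_cascade_dec(text):
--     tokens = tokenize(text)
--     cumulative = 0
--     result = []
--     for kind, tok in tokens:
--         if kind == 'word':
--             result.append(''.join(shift_char(c, -cumulative) for c in tok))
--             cumulative += len(tok)
--         else:
--             result.append(tok)
--     return ''.join(result)
-- ===== SOURCE B (Python) =====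
-- import string
--
-- def shift_char(ch, amount):
--     """Shift a letter by `amount`, preserving case. Non-letters pass through."""
--     if ch in string.ascii_lowercase:
--         return chr((ord(ch) - ord('a') + amount) % 26 + ord('a'))
--     if ch in string.ascii_uppercase:
--         return chr((ord(ch) - ord('A') + amount) % 26 + ord('A'))
--     return ch
--
-- def word_cascade_dec(text):
--     # Single pass: no token list; shift letters as they are seen, update the
--     # cumulative letter count when a word ends.
--     cumulative = 0
--     word_len = 0
--     in_word = False
--     out = []
--     for ch in text:
--         if ch.isalpha():
--             if not in_word:
--                 word_len = 0
--                 in_word = True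
--             out.append(shift_char(ch, -cumulative))
--             word_len += 1
--         else:
--             if in_word:
--                 cumulative += word_len
--                 in_word = False
--             out.append(ch)
--     return ''.join(out)
-- ===== Notes on version B (the rewrite author's own statement) =====
-- stated objective: simpler
-- what changed: B replaces A's two-phase tokenize-into-(kind,token)-pairs-then-decode pipeline by one direct pass over the characters that keeps a cumulative count, current word length and an in-word flag, shifting letters as they are seen and never materialising a token list.
import Mathlib
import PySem

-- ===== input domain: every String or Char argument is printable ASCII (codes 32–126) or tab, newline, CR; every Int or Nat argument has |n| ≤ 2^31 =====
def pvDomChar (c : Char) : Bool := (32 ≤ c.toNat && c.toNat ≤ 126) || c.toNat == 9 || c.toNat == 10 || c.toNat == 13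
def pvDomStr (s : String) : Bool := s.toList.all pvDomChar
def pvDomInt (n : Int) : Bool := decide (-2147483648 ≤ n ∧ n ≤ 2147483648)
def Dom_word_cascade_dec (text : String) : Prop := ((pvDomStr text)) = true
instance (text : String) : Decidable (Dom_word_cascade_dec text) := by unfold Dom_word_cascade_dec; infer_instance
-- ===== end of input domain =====

-- B folds A's tokenize-then-decode pipeline into one direct pass (no token list); objective: simpler.

-- ===== PORT A =====
-- shift_char, shared verbatim by both Pythons (B keeps it unchanged)
def pvShiftChar (ch : Char) (amount : Int) : Char :=
  if 'a' ≤ ch ∧ ch ≤ 'z' then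
    Char.ofNat ((PySem.Int.mod ((ch.toNat : Int) - ('a'.toNat : Int) + amount) 26).toNat + 'a'.toNat)
  else if 'A' ≤ ch ∧ ch ≤ 'Z' then
    Char.ofNat ((PySem.Int.mod ((ch.toNat : Int) - ('A'.toNat : Int) + amount) 26).toNat + 'A'.toNat)
  else ch

-- tokenize's loop: current buffer `cur` kept in order, `inw` = in_word
def pvTokAux : List Char → List Char → Bool → List (Bool × List Char)
  | [], cur, inw => [(inw, cur)]
  | ch :: rest, cur, inw =>
      if PySem.Chars.isalpha ch = inw then pvTokAux rest (cur ++ [ch]) inw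
      else (inw, cur) :: pvTokAux rest [ch] (PySem.Chars.isalpha ch)

def pvTokenize (text : List Char) : List (Bool × List Char) :=
  match text with
  | [] => []
  | c :: rest => pvTokAux rest [c] (PySem.Chars.isalpha c)

-- the decoding loop over tokens, with `cumulative`
def pvDecode : List (Bool × List Char) → Int → List Char
  | [], _ => []
  | (true, tok) :: ts, cum => tok.map (fun c => pvShiftChar c (-cum)) ++ pvDecode ts (cum + tok.length)
  | (false, tok) :: ts, cum => tok ++ pvDecode ts cum

def word_cascade_dec (text : String) : String :=
  String.ofList (pvDecode (pvTokenize text.toList) 0)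

-- ===== PORT B =====
-- single pass: cumulative, word_len, in_word
def pvLoopB : List Char → Int → Int → Bool → List Char
  | [], _, _, _ => []
  | ch :: rest, cum, wlen, inw =>
      if PySem.Chars.isalpha ch then
        let wlen' := if inw then wlen else 0
        pvShiftChar ch (-cum) :: pvLoopB rest cum (wlen' + 1) true
      else
        let cum' := if inw then cum + wlen else cum
        ch :: pvLoopB rest cum' wlen false

def word_cascade_dec_alt (text : String) : String :=
  String.ofList (pvLoopB text.toList 0 0 false)

-- ===== PRECONDITION & SPEC =====
def Spec_word_cascade_dec (text : String) (out : String) : Prop := out = word_cascade_dec_alt text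
instance (text : String) (out : String) : Decidable (Spec_word_cascade_dec text out) := by unfold Spec_word_cascade_dec; infer_instance

-- ===== CLAIM (what is proved, stated in full; the proofs are below) =====
def Claim_equal_word_cascade_dec : Prop := ∀ (text : String), Dom_word_cascade_dec text → Spec_word_cascade_dec text (word_cascade_dec text)

-- ===== LEMMAS AND PROOFS =====

-- Main invariant: decoding the tokens still to be produced, with current buffer
-- `cur` and flag `inw`, equals B's remaining single pass (when inside a word,
-- B's word_len equals the buffer length).
theorem pvDecode_tokAux (rest : List Char) :
    ∀ (cur : List Char) (cum wlen : Int) (inw : Bool),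
      (inw = true → wlen = (cur.length : Int)) →
      pvDecode (pvTokAux rest cur inw) cum =
        (if inw then cur.map (fun c => pvShiftChar c (-cum)) else cur) ++ pvLoopB rest cum wlen inw := by
  induction rest with
  | nil =>
    intro cur cum wlen inw h
    cases inw <;> simp [pvTokAux, pvDecode, pvLoopB]
  | cons ch rest ih =>
    intro cur cum wlen inw h
    by_cases ha : PySem.Chars.isalpha ch = inw
    · cases inw with
      | true =>
        have hw : wlen = (cur.length : Int) := h rfl
        rw [show pvTokAux (ch :: rest) cur true = pvTokAux rest (cur ++ [ch]) true from by
          simp [pvTokAux, ha]]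
        rw [ih (cur ++ [ch]) cum (wlen + 1) true (by intro _; rw [hw]; simp [List.length_append])]
        simp [pvLoopB, ha]
      | false =>
        rw [show pvTokAux (ch :: rest) cur false = pvTokAux rest (cur ++ [ch]) false from by
          simp [pvTokAux, ha]]
        rw [ih (cur ++ [ch]) cum wlen false (by simp)]
        simp [pvLoopB, ha]
    · cases inw with
      | true =>
        have hna : PySem.Chars.isalpha ch = false := by
          cases hc : PySem.Chars.isalpha ch <;> simp_all
        have hw : wlen = (cur.length : Int) := h rfl
        rw [show pvTokAux (ch :: rest) cur true
              = (true, cur) :: pvTokAux rest [ch] false from by simp [pvTokAux, hna]]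
        show List.map _ cur ++ pvDecode (pvTokAux rest [ch] false) (cum + cur.length) = _
        rw [ih [ch] (cum + cur.length) wlen false (by simp)]
        simp [pvLoopB, hna, hw]
      | false =>
        have hpa : PySem.Chars.isalpha ch = true := by
          cases hc : PySem.Chars.isalpha ch <;> simp_all
        rw [show pvTokAux (ch :: rest) cur false
              = (false, cur) :: pvTokAux rest [ch] true from by simp [pvTokAux, hpa]]
        show cur ++ pvDecode (pvTokAux rest [ch] true) cum = _
        rw [ih [ch] cum 1 true (by simp)]
        simp [pvLoopB, hpa]

-- ===== VERDICT (by name: the statement is the Claim_ definition above) =====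
theorem word_cascade_dec_spec : Claim_equal_word_cascade_dec := by
  intro text _
  unfold Spec_word_cascade_dec word_cascade_dec word_cascade_dec_alt
  cases ht : text.toList with
  | nil => simp [pvTokenize, pvDecode, pvLoopB]
  | cons c rest =>
    rw [show pvTokenize (c :: rest) = pvTokAux rest [c] (PySem.Chars.isalpha c) from rfl]
    cases hc : PySem.Chars.isalpha c with
    | true =>
      rw [pvDecode_tokAux rest [c] 0 1 true (by simp)]
      simp [hc, pvLoopB]
    | false =>
      rw [pvDecode_tokAux rest [c] 0 0 false (by simp)]
      simp [hc, pvLoopB]
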